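-- pv_equiv track=rewrite | github.com/windvalleys/nonogram | tp3/helper.py | getRowCol
-- ===== SOURCE A (Python) =====
-- def getRowCol(puzzle):
--     rows = []
--     for i in range(len(puzzle)):
--         rows.append([])
--         count = 0
--         for tile in puzzle[i]:
--             if tile == 1:
--                 count += 1
--             elif count > 0:
--                 rows[i].append(count)
--                 count = 0
--         if count != 0:
--             rows[i].append(count)
--         if rows[i] == []:
--             rows[i] = [0]
--
--     cols = []
--     for i in range (len(puzzle[0])):
--         cols.append([])
--         count = 0
--         for j in range (len(puzzle)):
--             if puzzle[j][i] == 1: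
--                 count += 1
--             elif count > 0:
--                 cols[i].append(count)
--                 count = 0
--         if count != 0:
--             cols[i].append(count)
--         if cols[i] == []:
--             cols[i] = [0]
--     return [rows, cols]
-- ===== SOURCE B (Python) =====
-- def runs(line):
--     n = len(line)
--     starts = [i for i in range(n) if line[i] == 1 and (i == 0 or line[i - 1] != 1)]
--     ends = [i for i in range(n) if line[i] == 1 and (i == n - 1 or line[i + 1] != 1)]
--     return [e - s + 1 for s, e in zip(starts, ends)] or [0]
--
--
-- def getRowCol(puzzle):
--     rows = [runs(r) for r in puzzle]
--     cols = [runs([puzzle[j][i] for j in range(len(puzzle))])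
--             for i in range(len(puzzle[0]))]
--     return [rows, cols]
-- ===== Notes on version B (the rewrite author's own statement) =====
-- stated objective: alternative
-- what changed: B abandons A's stateful run-counter scan (increment on 1, flush on other values, duplicated for rows and columns) for a stateless boundary-detection method: two comprehensions collect the indices where a run of 1s starts (tile==1 and left neighbour isn't) and where it ends (tile==1 and right neighbour isn't), and the clue list is the pairwise differences end-start+1 of the zipped boundary lists, factored into one runs() helper applied to rows and to explicitly materialized columns.
import Mathlib
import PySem

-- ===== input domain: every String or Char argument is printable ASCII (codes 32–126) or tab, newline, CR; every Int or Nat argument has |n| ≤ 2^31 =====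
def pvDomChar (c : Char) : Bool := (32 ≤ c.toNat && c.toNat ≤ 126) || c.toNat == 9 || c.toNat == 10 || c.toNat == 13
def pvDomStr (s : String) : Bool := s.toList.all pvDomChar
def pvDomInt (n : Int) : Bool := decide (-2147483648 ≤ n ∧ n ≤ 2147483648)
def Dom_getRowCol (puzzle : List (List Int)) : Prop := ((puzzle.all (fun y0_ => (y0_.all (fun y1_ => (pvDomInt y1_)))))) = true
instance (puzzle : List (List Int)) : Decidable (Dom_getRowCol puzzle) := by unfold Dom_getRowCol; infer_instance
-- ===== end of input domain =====

-- B replaces A's stateful run-counter scan by stateless boundary detection: collect run-start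
-- and run-end indices by two comprehensions and return the differences end-start+1 (alternative).

-- ===== PORT A =====
-- one accumulation step of A's inner loop: state (result list, current count), next tile
def pvStepA (p : List Int × Int) (tile : Int) : List Int × Int :=
  if tile = 1 then (p.1, p.2 + 1)
  else if p.2 > 0 then (p.1 ++ [p.2], (0 : Int)) else p

-- A's post-loop finishing: flush the pending count, replace [] by [0]
def pvFinishA (s : List Int × Int) : List Int :=
  let res := if s.2 ≠ 0 then s.1 ++ [s.2] else s.1
  if res = [] then [0] else res

-- A's row-i body: scan the tiles of one row
def pvLineA (line : List Int) : List Int :=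
  pvFinishA (line.foldl pvStepA ([], 0))

-- A: rows by scanning each row; cols by a nested index loop over j reading puzzle[j][i].
-- Python raises IndexError on empty/too-short rows; Pre_ excludes those, getD is a dummy there.
def getRowCol (puzzle : List (List Int)) : List (List (List Int)) :=
  let rows := puzzle.map pvLineA
  let cols := (List.range (puzzle.getD 0 []).length).map (fun i =>
    pvFinishA ((List.range puzzle.length).foldl
      (fun p j => pvStepA p ((puzzle.getD j []).getD i 0)) ([], 0)))
  [rows, cols]

-- ===== PORT B =====
-- B's runs(line): run-start and run-end indices by boundary detection, then pairwise differences
def pvRunsB (line : List Int) : List Int :=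
  let n := line.length
  let starts := (List.range n).filter
    (fun i => line.getD i 0 == 1 && (i == 0 || !(line.getD (i - 1) 0 == 1)))
  let ends := (List.range n).filter
    (fun i => line.getD i 0 == 1 && (i == n - 1 || !(line.getD (i + 1) 0 == 1)))
  let r := (starts.zip ends).map (fun p => ((p.2 : Int) - (p.1 : Int) + 1))
  if r = [] then [0] else r

-- B: runs over each row and over columns materialized by explicit indexing (getD dummy outside Pre_)
def getRowCol_alt (puzzle : List (List Int)) : List (List (List Int)) :=
  let rows := puzzle.map pvRunsB
  let cols := (List.range (puzzle.getD 0 []).length).map (fun i =>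
    pvRunsB ((List.range puzzle.length).map (fun j => (puzzle.getD j []).getD i 0)))
  [rows, cols]

-- ===== PRECONDITION & SPEC =====
-- Pre_ excludes exactly the inputs where Python A (and B) raises IndexError: the empty puzzle
-- (puzzle[0]) and ragged puzzles with a row shorter than the first row (puzzle[j][i]).
def Pre_getRowCol (puzzle : List (List Int)) : Prop :=
  puzzle ≠ [] ∧ ∀ r ∈ puzzle, (puzzle.getD 0 []).length ≤ r.length
instance (puzzle : List (List Int)) : Decidable (Pre_getRowCol puzzle) := by
  unfold Pre_getRowCol; infer_instance
def pvWitness_getRowCol : List (List Int) := [[1, 0], [1, 1]]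

def Spec_getRowCol (puzzle : List (List Int)) (out : List (List (List Int))) : Prop := out = getRowCol_alt puzzle
instance (puzzle : List (List Int)) (out : List (List (List Int))) : Decidable (Spec_getRowCol puzzle out) := by unfold Spec_getRowCol; infer_instance

-- ===== CLAIM (what is proved, stated in full; the proofs are below) =====
def Claim_equal_getRowCol : Prop := ∀ (puzzle : List (List Int)), Dom_getRowCol puzzle → Pre_getRowCol puzzle → Spec_getRowCol puzzle (getRowCol puzzle)

-- ===== LEMMAS AND PROOFS =====

-- common middleman: leading-ones count and the recursive block decomposition
def pvOnes : List Int → Nat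
  | [] => 0
  | x :: xs => if x = 1 then pvOnes xs + 1 else 0

def pvBlocks : List Int → List Int
  | [] => []
  | x :: xs =>
    if x = 1 then ((pvOnes xs + 1 : Nat) : Int) :: pvBlocks (xs.drop (pvOnes xs))
    else pvBlocks xs
termination_by l => l.length
decreasing_by
  · simp
  · simp

-- A's loop with pending count k equals the block decomposition (core invariant)
def pvCore : Nat → List Int → List Int
  | k, [] => if k ≠ 0 then [(k : Int)] else []
  | k, x :: xs => if x = 1 then pvCore (k + 1) xs
      else if k ≠ 0 then (k : Int) :: pvCore 0 xs else pvCore 0 xs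

theorem lemA_core (xs : List Int) : ∀ (res : List Int) (k : Nat),
    (let s := xs.foldl pvStepA (res, (k : Int));
     if s.2 ≠ 0 then s.1 ++ [s.2] else s.1) = res ++ pvCore k xs := by
  induction xs with
  | nil =>
    intro res k
    by_cases hk : k = 0 <;> simp [pvCore, hk]
  | cons x xs ih =>
    intro res k
    simp only [List.foldl_cons]
    by_cases hx : x = 1
    · have h1 : pvStepA (res, (k : Int)) x = (res, ((k + 1 : Nat) : Int)) := by
        simp only [pvStepA, if_pos hx]
        push_cast
        rfl
      rw [h1]
      simp only [pvCore, if_pos hx]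
      exact ih res (k + 1)
    · by_cases hk : k = 0
      · subst hk
        have h1 : pvStepA (res, ((0 : Nat) : Int)) x = (res, ((0 : Nat) : Int)) := by
          simp [pvStepA, hx]
        rw [h1]
        simp only [pvCore, if_neg hx, ne_eq, not_true_eq_false, if_false]
        simpa using ih res 0
      · have h1 : pvStepA (res, (k : Int)) x = (res ++ [(k : Int)], ((0 : Nat) : Int)) := by
          simp only [pvStepA, if_neg hx]
          rw [if_pos (by exact_mod_cast Nat.pos_of_ne_zero hk)]
          simp
        rw [h1]
        simp only [pvCore, if_neg hx, ne_eq, hk, not_false_eq_true, if_pos]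
        rw [ih (res ++ [(k : Int)]) 0]
        simp

theorem lemCore (xs : List Int) :
    pvCore 0 xs = pvBlocks xs ∧
    ∀ k : Nat, pvCore (k + 1) xs =
      ((k + 1 + pvOnes xs : Nat) : Int) :: pvBlocks (xs.drop (pvOnes xs)) := by
  induction xs with
  | nil =>
    refine ⟨by simp [pvCore, pvBlocks], fun k => ?_⟩
    simp [pvCore, pvOnes, pvBlocks]
  | cons x xs ih =>
    by_cases hx : x = 1
    · refine ⟨?_, fun k => ?_⟩
      · have h0 : (0 : Nat) + 1 + pvOnes xs = pvOnes xs + 1 := by omega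
        rw [pvCore, if_pos hx, pvBlocks, if_pos hx, ih.2 0, h0]
      · have h2 : k + 1 + 1 + pvOnes xs = k + 1 + (pvOnes xs + 1) := by omega
        rw [pvCore, if_pos hx, ih.2 (k + 1)]
        simp only [pvOnes, if_pos hx, List.drop_succ_cons, h2]
    · refine ⟨?_, fun k => ?_⟩
      · rw [pvCore, if_neg hx, pvBlocks, if_neg hx]; exact ih.1
      · rw [pvCore, if_neg hx, if_pos (by omega : ¬ (k + 1) = 0)]
        simp only [pvOnes, if_neg hx, List.drop_zero, ih.1, pvBlocks]

theorem lemA_line (line : List Int) :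
    pvLineA line = (let r := pvBlocks line; if r = [] then [0] else r) := by
  have h := lemA_core line [] 0
  simp only [Nat.cast_zero] at h
  simp only [pvLineA, pvFinishA, h, List.nil_append, (lemCore line).1]

-- recursive forms of B's boundary comprehensions
def pvStartsR (prev : Int) : List Int → List Nat
  | [] => []
  | x :: xs =>
    if x = 1 ∧ prev ≠ 1 then 0 :: (pvStartsR x xs).map (· + 1)
    else (pvStartsR x xs).map (· + 1)

def pvEndsR : List Int → List Nat
  | [] => []
  | x :: xs =>
    if x = 1 ∧ xs.getD 0 0 ≠ 1 then 0 :: (pvEndsR xs).map (· + 1)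
    else (pvEndsR xs).map (· + 1)

def pvMapVal (l : List (Nat × Nat)) : List Int :=
  l.map (fun p => ((p.2 : Int) - (p.1 : Int) + 1))

-- the filter comprehensions equal the recursive forms
theorem starts_filter (line : List Int) : ∀ prev : Int,
    (List.range line.length).filter
      (fun i => line.getD i 0 == 1 && ((prev :: line).getD i 0 != 1)) = pvStartsR prev line := by
  induction line with
  | nil => intro prev; simp [pvStartsR]
  | cons x xs ih =>
    intro prev
    rw [List.length_cons, List.range_succ_eq_map, List.filter_cons, List.filter_map]
    have htail : List.filter ((fun i => (x :: xs).getD i 0 == 1 &&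
        ((prev :: x :: xs).getD i 0 != 1)) ∘ Nat.succ) (List.range xs.length) =
        pvStartsR x xs := by
      rw [← ih x]
      apply List.filter_congr
      intro i _
      simp
    rw [htail]
    by_cases h : x = 1 ∧ prev ≠ 1
    · have hb : ((x :: xs).getD 0 0 == 1 && ((prev :: x :: xs).getD 0 0 != 1)) = true := by
        simp [h.1, h.2]
      rw [pvStartsR, if_pos h, if_pos hb]
    · have hb : ((x :: xs).getD 0 0 == 1 && ((prev :: x :: xs).getD 0 0 != 1)) = false := by
        rcases not_and_or.mp h with h1 | h1
        · simp [h1]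
        · simp [not_not.mp h1]
      rw [pvStartsR, if_neg h, hb]
      simp

theorem ends_filter (line : List Int) :
    (List.range line.length).filter
      (fun i => line.getD i 0 == 1 && (line.getD (i + 1) 0 != 1)) = pvEndsR line := by
  induction line with
  | nil => simp [pvEndsR]
  | cons x xs ih =>
    rw [List.length_cons, List.range_succ_eq_map, List.filter_cons, List.filter_map]
    have htail : List.filter ((fun i => (x :: xs).getD i 0 == 1 &&
        ((x :: xs).getD (i + 1) 0 != 1)) ∘ Nat.succ) (List.range xs.length) = pvEndsR xs := by
      rw [← ih]
      apply List.filter_congr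
      intro i _
      simp
    rw [htail]
    by_cases h : x = 1 ∧ xs.getD 0 0 ≠ 1
    · have h2 : ¬ xs[0]?.getD 0 = 1 := by simpa [List.getD] using h.2
      have hb : ((x :: xs).getD 0 0 == 1 && ((x :: xs).getD (0 + 1) 0 != 1)) = true := by
        simp [h.1, List.getD, h2]
      rw [pvEndsR, if_pos h, if_pos hb]
    · have hb : ((x :: xs).getD 0 0 == 1 && ((x :: xs).getD (0 + 1) 0 != 1)) = false := by
        rcases not_and_or.mp h with h1 | h1
        · simp [h1]
        · have h2 : xs[0]?.getD 0 = 1 := by simpa [List.getD] using not_not.mp h1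
          simp [List.getD, h2]
      rw [pvEndsR, if_neg h, hb]
      simp

-- shifting both boundary lists by one does not change the differences
theorem mapVal_shift (a b : List Nat) :
    pvMapVal ((a.map (· + 1)).zip (b.map (· + 1))) = pvMapVal (a.zip b) := by
  rw [List.zip_map]
  simp only [pvMapVal, List.map_map]
  apply List.map_congr_left
  intro p _
  simp only [Function.comp_apply, Prod.map]
  push_cast
  ring

-- when the head is not a 1, the previous tile is irrelevant to the start list
theorem startsR_irrel (l : List Int) (h : l.getD 0 0 ≠ 1) (p q : Int) :
    pvStartsR p l = pvStartsR q l := by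
  cases l with
  | nil => rfl
  | cons x xs =>
    have hx : x ≠ 1 := by simpa using h
    rw [pvStartsR, pvStartsR, if_neg (by tauto), if_neg (by tauto)]

theorem ones_head_ne (l : List Int) (h : l.getD 0 0 ≠ 1) : pvOnes l = 0 := by
  cases l with
  | nil => rfl
  | cons x xs => simpa [pvOnes] using fun hx => absurd hx (by simpa using h)

theorem ones_head_eq (l : List Int) (h : l.getD 0 0 = 1) : ∃ m, pvOnes l = m + 1 := by
  cases l with
  | nil => simp at h
  | cons x xs =>
    refine ⟨pvOnes xs, ?_⟩
    simp only [List.getD_cons_zero] at h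
    simp [pvOnes, h]

-- the core correspondence: zipped boundary differences are the block decomposition
theorem PQmain (line : List Int) :
    (∀ prev : Int, prev ≠ 1 →
      pvMapVal ((pvStartsR prev line).zip (pvEndsR line)) = pvBlocks line) ∧
    (line.getD 0 0 = 1 → ∃ E',
      pvEndsR line = (pvOnes line - 1) :: E' ∧
      pvMapVal ((pvStartsR 1 line).zip E') = pvBlocks (line.drop (pvOnes line))) := by
  induction line with
  | nil =>
    refine ⟨fun prev _ => by simp [pvStartsR, pvEndsR, pvMapVal, pvBlocks], fun h => by simp at h⟩
  | cons x xs ih =>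
    obtain ⟨Pxs, Qxs⟩ := ih
    constructor
    · intro prev hprev
      by_cases hx : x = 1
      · subst hx
        rw [pvStartsR, if_pos ⟨rfl, hprev⟩]
        by_cases h0 : xs.getD 0 0 = 1
        · obtain ⟨E', hE, hQ⟩ := Qxs h0
          obtain ⟨m, hm⟩ := ones_head_eq xs h0
          rw [pvEndsR, if_neg (by tauto), hE]
          simp only [List.map_cons, List.zip_cons_cons, pvMapVal, List.map_cons]
          rw [pvBlocks, if_pos rfl]
          refine List.cons_eq_cons.mpr ⟨?_, ?_⟩
          · rw [hm]; push_cast; omega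
          · have := mapVal_shift (pvStartsR 1 xs) E'
            simp only [pvMapVal] at this hQ ⊢
            rw [this, hQ]
        · rw [pvEndsR, if_pos ⟨rfl, h0⟩]
          simp only [List.zip_cons_cons, pvMapVal, List.map_cons]
          rw [pvBlocks, if_pos rfl, ones_head_ne xs h0]
          refine List.cons_eq_cons.mpr ⟨?_, ?_⟩
          · norm_num
          · have hirr : pvStartsR 1 xs = pvStartsR 0 xs := startsR_irrel xs h0 1 0
            have := mapVal_shift (pvStartsR 1 xs) (pvEndsR xs)
            simp only [pvMapVal] at this ⊢
            rw [this, hirr]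
            have := Pxs 0 (by norm_num)
            simp only [pvMapVal] at this
            simpa using this
      · rw [pvStartsR, if_neg (by tauto), pvEndsR, if_neg (by tauto),
          pvBlocks, if_neg hx, mapVal_shift]
        exact Pxs x hx
    · intro hhead
      have hx : x = 1 := by simpa using hhead
      subst hx
      have hones : pvOnes ((1 : Int) :: xs) = pvOnes xs + 1 := by simp [pvOnes]
      rw [pvStartsR, if_neg (by simp)]
      by_cases h0 : xs.getD 0 0 = 1
      · obtain ⟨E', hE, hQ⟩ := Qxs h0
        obtain ⟨m, hm⟩ := ones_head_eq xs h0
        refine ⟨E'.map (· + 1), ?_, ?_⟩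
        · rw [pvEndsR, if_neg (by tauto), hE]
          simp only [List.map_cons]
          congr 1
          omega
        · rw [mapVal_shift, hQ, hones]
          simp
      · refine ⟨(pvEndsR xs).map (· + 1), ?_, ?_⟩
        · rw [pvEndsR, if_pos ⟨rfl, h0⟩, hones, ones_head_ne xs h0]
        · rw [mapVal_shift, startsR_irrel xs h0 1 0, hones, ones_head_ne xs h0]
          simpa using Pxs 0 (by norm_num)

-- B's comprehension predicates equal the sentinel forms used above
theorem pred_starts (line : List Int) :
    (List.range line.length).filter
      (fun i => line.getD i 0 == 1 && (i == 0 || !(line.getD (i - 1) 0 == 1))) =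
    pvStartsR 0 line := by
  rw [← starts_filter line 0]
  apply List.filter_congr
  intro i _
  cases i with
  | zero => simp
  | succ j => simp [bne]

theorem pred_ends (line : List Int) :
    (List.range line.length).filter
      (fun i => line.getD i 0 == 1 &&
        (i == line.length - 1 || !(line.getD (i + 1) 0 == 1))) = pvEndsR line := by
  rw [← ends_filter line]
  apply List.filter_congr
  intro i hi
  have hin : i < line.length := List.mem_range.mp hi
  by_cases hl : i = line.length - 1
  · have h2 : line.getD (i + 1) 0 = 0 := List.getD_eq_default _ _ (by omega)
    simp only [List.getD] at h2
    simp [List.getD, h2]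
  · have hb : (i == line.length - 1) = false := by simp [hl]
    simp [List.getD, hb, bne]

theorem lemB_line (line : List Int) :
    pvRunsB line = (let r := pvBlocks line; if r = [] then [0] else r) := by
  have hs := pred_starts line
  have he := pred_ends line
  have hP := (PQmain line).1 0 (by norm_num)
  simp only [pvRunsB, hs, he]
  simp only [pvMapVal] at hP
  rw [hP]

theorem line_eq (line : List Int) : pvLineA line = pvRunsB line := by
  rw [lemA_line, lemB_line]

-- A's inner column loop over j reading puzzle[j][i] equals a fold over the materialized column
theorem colFold (i : Nat) : ∀ (puzzle : List (List Int)) (init : List Int × Int),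
    (List.range puzzle.length).foldl (fun p j => pvStepA p ((puzzle.getD j []).getD i 0)) init
      = (puzzle.map (fun r => r.getD i 0)).foldl pvStepA init := by
  intro puzzle
  induction puzzle with
  | nil => intro init; simp
  | cons r rs ihp =>
    intro init
    rw [List.length_cons, List.range_succ_eq_map, List.foldl_cons, List.foldl_map,
        List.map_cons, List.foldl_cons]
    simp only [List.getD_cons_zero, List.getD_cons_succ]
    exact ihp _

-- B's materialized column equals the mapped column
theorem colList (i : Nat) : ∀ (puzzle : List (List Int)),
    (List.range puzzle.length).map (fun j => (puzzle.getD j []).getD i 0)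
      = puzzle.map (fun r => r.getD i 0) := by
  intro puzzle
  induction puzzle with
  | nil => simp
  | cons r rs ihp =>
    rw [List.length_cons, List.range_succ_eq_map, List.map_cons, List.map_map, List.map_cons]
    simp only [List.getD_cons_zero, Function.comp_def, List.getD_cons_succ]
    exact congrArg (fun l => _ :: l) ihp

-- ===== VERDICT (by name: the statement is the Claim_ definition above) =====
theorem getRowCol_spec : Claim_equal_getRowCol := by
  intro puzzle _ _
  unfold Spec_getRowCol getRowCol getRowCol_alt
  have hrows : puzzle.map pvLineA = puzzle.map pvRunsB :=
    List.map_congr_left (fun r _ => line_eq r)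
  have hcols : ∀ i : Nat,
      pvFinishA ((List.range puzzle.length).foldl
        (fun p j => pvStepA p ((puzzle.getD j []).getD i 0)) ([], 0)) =
      pvRunsB ((List.range puzzle.length).map (fun j => (puzzle.getD j []).getD i 0)) := by
    intro i
    rw [colList i puzzle, ← line_eq, pvLineA, colFold]
  exact congrArg₂ (fun a b => [a, b]) hrows (List.map_congr_left (fun i _ => hcols i))
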